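-- pv_equiv track=rewrite | github.com/egon12/sudoku_solver | killer_adv.py | genadd
-- ===== SOURCE A (Python) =====
-- def genadd(prev, num, digits):
--     if num == 0:
--         yield digits
--         return
--
--     for i in range(prev+1, 10):
--         d = digits.copy()
--         d.append(i)
--         yield from genadd(i, num - 1, d)
-- ===== SOURCE B (Python) =====
-- def genadd(prev, num, digits):
--     # Iterative level-by-level construction instead of recursion:
--     # grow all strictly-increasing suffix combinations one digit at a time.
--     if num < 0:
--         return
--     combos = [[]]
--     for _ in range(num):
--         combos = [c + [i]
--                   for c in combos
--                   for i in range((c[-1] if c else prev) + 1, 10)]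
--         if not combos:
--             break  # no combination can grow any further
--     for c in combos:
--         yield digits + c
-- ===== Notes on version B (the rewrite author's own statement) =====
-- stated objective: alternative
-- what changed: Replaces the recursive generator (DFS with accumulator threading) by an iterative level-by-level construction: all strictly-increasing suffix combinations are grown one digit per pass over the current level, then each is appended to digits.
import Mathlib
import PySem

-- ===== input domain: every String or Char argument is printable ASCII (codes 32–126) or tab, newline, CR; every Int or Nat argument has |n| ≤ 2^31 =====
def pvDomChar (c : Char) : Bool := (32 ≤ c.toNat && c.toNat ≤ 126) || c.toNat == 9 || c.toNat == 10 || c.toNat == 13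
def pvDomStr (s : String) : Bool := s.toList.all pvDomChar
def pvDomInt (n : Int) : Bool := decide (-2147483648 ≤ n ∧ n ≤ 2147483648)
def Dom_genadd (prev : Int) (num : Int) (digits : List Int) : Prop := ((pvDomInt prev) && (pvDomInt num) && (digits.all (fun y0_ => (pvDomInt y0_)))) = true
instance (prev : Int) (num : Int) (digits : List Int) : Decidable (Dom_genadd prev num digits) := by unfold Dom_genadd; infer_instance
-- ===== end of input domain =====

-- B replaces A's recursive DFS generator by an iterative level-by-level construction (alternative decomposition, same cost).

-- ===== PORT A =====
-- literal port of the recursive generator; the yielded lists are collected in order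
def genadd (prev : Int) (num : Int) (digits : List Int) : List (List Int) :=
  if num = 0 then [digits]
  else
    (PySem.List.pyRange (prev + 1) 10 1).attach.flatMap
      (fun x => genadd x.1 (num - 1) (digits ++ [x.1]))
termination_by (10 - prev).toNat
decreasing_by
  have h := (PySem.List.mem_pyRange_one).1 x.2
  omega

-- ===== PORT B =====
-- one extension pass: every combo c gains each digit in range((c[-1] if c else prev)+1, 10)
def pvExt (base : Int) (c : List Int) : List (List Int) :=
  (PySem.List.pyRange (c.getLastD base + 1) 10 1).map (fun i => c ++ [i])

def pvStep (prev : Int) (combos : List (List Int)) : List (List Int) :=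
  combos.flatMap (pvExt prev)

-- the 'for _ in range(num): combos = …; if not combos: break' loop, with the break
def pvLoop (prev : Int) (fuel : Nat) (combos : List (List Int)) : List (List Int) :=
  match fuel with
  | 0 => combos
  | n + 1 =>
    let next := pvStep prev combos
    if next.isEmpty then next else pvLoop prev n next

def genadd_alt (prev : Int) (num : Int) (digits : List Int) : List (List Int) :=
  if num < 0 then []
  else (pvLoop prev num.toNat [[]]).map (fun c => digits ++ c)

-- ===== PRECONDITION & SPEC =====
-- Pre_ excludes only inputs on which CPython raises RecursionError: prev so negative that the
-- recursion depth (bounded by 10 - prev, and by num + 1 when 0 <= num) exceeds the interpreter's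
-- recursion limit; the margin (900 vs ~1000) is because the exact limit depends on the caller's stack.
def Pre_genadd (prev : Int) (num : Int) (digits : List Int) : Prop :=
  -900 ≤ prev ∨ (0 ≤ num ∧ num ≤ 900)
instance (prev : Int) (num : Int) (digits : List Int) : Decidable (Pre_genadd prev num digits) := by unfold Pre_genadd; infer_instance
def pvWitness_genadd : Int × Int × List Int := (0, 2, [])

def Spec_genadd (prev : Int) (num : Int) (digits : List Int) (out : List (List Int)) : Prop := out = genadd_alt prev num digits
instance (prev : Int) (num : Int) (digits : List Int) (out : List (List Int)) : Decidable (Spec_genadd prev num digits out) := by unfold Spec_genadd; infer_instance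

-- ===== CLAIM (what is proved, stated in full; the proofs are below) =====
def Claim_equal_genadd : Prop := ∀ (prev : Int) (num : Int) (digits : List Int), Dom_genadd prev num digits → Pre_genadd prev num digits → Spec_genadd prev num digits (genadd prev num digits)

-- ===== LEMMAS AND PROOFS =====

-- proof-only characterisation: all strictly-increasing k-combinations from (a,10), lexicographic
def combR (a : Int) (k : Nat) : List (List Int) :=
  match k with
  | 0 => [[]]
  | k + 1 =>
    (PySem.List.pyRange (a + 1) 10 1).attach.flatMap
      (fun x => (combR x.1 k).map (fun c => x.1 :: c))

lemma genadd_neg (prev : Int) (num : Int) (digits : List Int) (h : num < 0) :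
    genadd prev num digits = [] := by
  rw [genadd, if_neg (by omega : ¬ num = 0)]
  apply List.flatMap_eq_nil_iff.mpr
  intro x _
  exact genadd_neg x.1 (num - 1) (digits ++ [x.1]) (by omega)
termination_by (10 - prev).toNat
decreasing_by
  have h := (PySem.List.mem_pyRange_one).1 x.2
  omega

lemma genadd_cast (k : Nat) (prev : Int) (digits : List Int) :
    genadd prev (k : Int) digits = (combR prev k).map (fun c => digits ++ c) := by
  cases k with
  | zero => rw [genadd]; simp [combR]
  | succ k =>
    rw [genadd, if_neg (by exact_mod_cast Nat.succ_ne_zero k), combR, List.map_flatMap]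
    congr 1
    funext x
    have h1 : ((k + 1 : Nat) : Int) - 1 = (k : Int) := by push_cast; ring
    rw [h1, genadd_cast k x.1 (digits ++ [x.1])]
    simp [List.map_map, Function.comp_def]

lemma ext_cons (a i : Int) (c : List Int) :
    pvExt a (i :: c) = (pvExt i c).map (fun d => i :: d) := by
  unfold pvExt
  rw [List.getLastD_cons]
  simp [List.map_map, Function.comp_def]

lemma map_singleton_flatten (r : List Int) :
    r.map (fun i => ([i] : List Int)) = (r.map (fun x => [[x]])).flatten := by
  induction r with
  | nil => rfl
  | cons h t ih => simp [ih]

lemma step_combR (n : Nat) (a : Int) : pvStep a (combR a n) = combR a (n + 1) := by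
  induction n generalizing a with
  | zero =>
    simp only [pvStep, combR]
    unfold pvExt
    simp [List.flatMap, map_singleton_flatten]
  | succ n ih =>
    conv_lhs => rw [combR]
    conv_rhs => rw [combR]
    unfold pvStep
    rw [List.flatMap_assoc]
    congr 1
    funext x
    rw [List.flatMap_map]
    calc (combR x.1 n).flatMap (fun c => pvExt a (x.1 :: c))
        = (combR x.1 n).flatMap (fun c => (pvExt x.1 c).map (fun d => x.1 :: d)) := by
          simp only [ext_cons]
      _ = ((combR x.1 n).flatMap (pvExt x.1)).map (fun d => x.1 :: d) := by
          rw [List.map_flatMap]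
      _ = (combR x.1 (n + 1)).map (fun d => x.1 :: d) := by
          rw [← ih x.1]; rfl

lemma combR_nil_mono (a : Int) (m j : Nat) (h : combR a m = []) : combR a (m + j) = [] := by
  induction j with
  | zero => exact h
  | succ j ih =>
    have h1 : m + (j + 1) = (m + j) + 1 := by omega
    rw [h1, ← step_combR (m + j) a, ih]
    simp [pvStep]

lemma pvLoop_combR (n : Nat) (k : Nat) (a : Int) :
    pvLoop a n (combR a k) = combR a (k + n) := by
  induction n generalizing k with
  | zero => rfl
  | succ n ih =>
    rw [pvLoop]
    simp only [step_combR k a]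
    by_cases h : (combR a (k + 1)).isEmpty
    · rw [if_pos h]
      have h0 : combR a (k + 1) = [] := List.isEmpty_iff.mp h
      have := combR_nil_mono a (k + 1) n h0
      rw [h0, ← this]
      congr 1
      omega
    · rw [if_neg h, ih (k + 1)]
      congr 1
      omega


-- ===== VERDICT (by name: the statement is the Claim_ definition above) =====
theorem genadd_spec : Claim_equal_genadd := by
  unfold Claim_equal_genadd Spec_genadd
  intro prev num digits _ _
  rcases lt_or_ge num 0 with h | h
  · rw [genadd_neg _ _ _ h, genadd_alt, if_pos h]
  · obtain ⟨k, rfl⟩ : ∃ k : Nat, num = (k : Int) := ⟨num.toNat, by omega⟩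
    rw [genadd_alt, if_neg (by omega), genadd_cast, Int.toNat_natCast]
    have h0 : ([[]] : List (List Int)) = combR prev 0 := rfl
    rw [h0, pvLoop_combR, Nat.zero_add]
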